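-- pv_equiv track=rewrite | github.com/kanujoa/coding_test_practice | python_programmers_school/level 1/폰켓몬.py | solution
-- ===== SOURCE A (Python) =====
-- def solution(nums):
--     select = len(nums) // 2
--     cnt = 0
--     prev = []
--     for n in nums:
--         if select == 0:
--             break
--         if n not in prev:
--             prev.append(n)
--             cnt += 1
--             select -= 1
--     return cnt
-- ===== SOURCE B (Python) =====
-- def solution(nums):
--     return min(len(set(nums)), len(nums) // 2)
-- ===== Notes on version B (the rewrite author's own statement) =====
-- stated objective: simpler
-- what changed: Replaces the incremental loop (running counter, membership list, early break) with a closed form: the number of distinct values, computed once with a set, capped at len(nums)//2.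
import Mathlib
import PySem

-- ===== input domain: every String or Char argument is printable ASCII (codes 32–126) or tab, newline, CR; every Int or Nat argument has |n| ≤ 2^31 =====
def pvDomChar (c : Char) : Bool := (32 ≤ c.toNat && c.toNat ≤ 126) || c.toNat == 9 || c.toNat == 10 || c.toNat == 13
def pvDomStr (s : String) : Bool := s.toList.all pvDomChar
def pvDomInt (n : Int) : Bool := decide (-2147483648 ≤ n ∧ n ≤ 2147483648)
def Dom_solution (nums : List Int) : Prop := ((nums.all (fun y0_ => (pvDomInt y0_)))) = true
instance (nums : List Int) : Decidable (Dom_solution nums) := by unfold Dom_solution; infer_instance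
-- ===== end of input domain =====

-- B replaces A's counting loop with a closed form: distinct count capped at len(nums)//2.

-- ===== PORT A =====
-- the for-loop of A: state (select, cnt, prev), with the 'break' when select == 0
def solLoopA (nums : List Int) (select cnt : Int) (prev : List Int) : Int :=
  match nums with
  | [] => cnt
  | n :: t =>
      if select = 0 then cnt
      else if n ∈ prev then solLoopA t select cnt prev
      else solLoopA t (select - 1) (cnt + 1) (prev ++ [n])

def solution (nums : List Int) : Int :=
  solLoopA nums (PySem.Int.floordiv (nums.length : Int) 2) 0 []

-- ===== PORT B =====
def solution_alt (nums : List Int) : Int :=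
  min ((PySem.Set.ofList nums).length : Int) (PySem.Int.floordiv (nums.length : Int) 2)

-- ===== PRECONDITION & SPEC =====
def Spec_solution (nums : List Int) (out : Int) : Prop := out = solution_alt nums
instance (nums : List Int) (out : Int) : Decidable (Spec_solution nums out) := by unfold Spec_solution; infer_instance

-- ===== CLAIM (what is proved, stated in full; the proofs are below) =====
def Claim_equal_solution : Prop := ∀ (nums : List Int), Dom_solution nums → Spec_solution nums (solution nums)

-- ===== LEMMAS AND PROOFS =====

-- number of elements of t that are new relative to prev (each counted once)
def ndist (t prev : List Int) : Int :=
  match t with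
  | [] => 0
  | n :: t => if n ∈ prev then ndist t prev else 1 + ndist t (prev ++ [n])

theorem ndist_nonneg (t prev : List Int) : 0 ≤ ndist t prev := by
  induction t generalizing prev with
  | nil => simp [ndist]
  | cons n t ih =>
      simp only [ndist]
      split
      · exact ih prev
      · have := ih (prev ++ [n]); omega

theorem solLoopA_eq (t : List Int) : ∀ (select cnt : Int) (prev : List Int),
    0 ≤ select → solLoopA t select cnt prev = cnt + min (ndist t prev) select := by
  induction t with
  | nil => intro select cnt prev h; simp [solLoopA, ndist]; omega
  | cons n t ih =>
      intro select cnt prev h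
      simp only [solLoopA]
      by_cases h0 : select = 0
      · have := ndist_nonneg (n :: t) prev
        simp only [h0, if_true]
        omega
      · simp only [h0, if_false]
        by_cases hm : n ∈ prev
        · rw [if_pos hm, ih select cnt prev h, ndist, if_pos hm]
        · rw [if_neg hm, ih (select - 1) (cnt + 1) (prev ++ [n]) (by omega)]
          simp only [ndist, if_neg hm]
          have := ndist_nonneg t (prev ++ [n])
          omega

theorem ofList_len_eq (t : List Int) : ∀ (prev : List Int),
    ((PySem.Set.update prev t).length : Int) = (prev.length : Int) + ndist t prev := by
  induction t with
  | nil => intro prev; simp [PySem.Set.update, ndist]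
  | cons n t ih =>
      intro prev
      simp only [PySem.Set.update, List.foldl_cons, ndist]
      by_cases hm : n ∈ prev
      · have hadd : PySem.Set.add prev n = prev := by
          simp [PySem.Set.add, PySem.Set.contains, hm]
        rw [hadd]
        simp only [hm, if_true]
        exact ih prev
      · have hadd : PySem.Set.add prev n = prev ++ [n] := by
          simp [PySem.Set.add, PySem.Set.contains, hm]
        rw [hadd]
        simp only [hm, if_false]
        have := ih (prev ++ [n])
        simp only [PySem.Set.update] at this
        rw [this]
        simp; omega

-- ===== VERDICT (by name: the statement is the Claim_ definition above) =====
theorem solution_spec : Claim_equal_solution := by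
  intro nums _
  unfold Spec_solution solution solution_alt
  have hdiv : 0 ≤ PySem.Int.floordiv (nums.length : Int) 2 := by
    rw [PySem.Int.floordiv_eq_ediv_of_pos (by omega)]
    exact Int.ediv_nonneg (by positivity) (by omega)
  rw [solLoopA_eq nums _ 0 [] hdiv]
  have h := ofList_len_eq nums []
  simp only [List.length_nil, Int.natCast_zero, zero_add] at h
  have : PySem.Set.ofList nums = PySem.Set.update [] nums := by
    simp [PySem.Set.ofList_eq_foldl, PySem.Set.update]
  rw [this, h]
  omega
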